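-- pv_equiv track=rewrite | github.com/guillaume-havard/dispersion | src/dispersion.py | dispertion_rank
-- ===== SOURCE A (Python) =====
-- def dispertion_rank(levels, window):
--     """
--     Will compute the rank of each pixel with thier neighboor pixels
--
--     levels [in] : list(list(int [0, 255]))
--     window [in] : Int (size of the square window)
--
--     return : list(list(int [0, 255]))
--     """
--     rank = []
--     # filtre sur le rang.
--     # faire les comparaison avec :  "a < x < b"
--     for x in range(len(levels)):
--         rank.append([])
--         for y in range(len(levels[x])):
--             rank[x].append(0)
--
--             if x < (window//2) or x >= (len(levels) - (window//2) - 1):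
--                 continue
--             if y < (window//2) or y >= (len(levels[x]) - (window//2) - 1):
--                 continue
--
--             for i in range(window):
--                 for j in range(window):
--                     if i == window//2 and j == window//2:
--                         continue
--                     if levels[x][y] < levels[x - window//2 + i]\
--                                             [y - window//2 + j]:
--                         rank[x][y] = rank[x][y] + 1
--
--     return rank
-- ===== SOURCE B (Python) =====
-- def dispertion_rank(levels, window):
--     """Sliding-window re-implementation: for each interior row, keep the
--     flattened window contents as a list slid column by column (append the
--     incoming column, count, drop the leftmost column), and count strictly
--     greater values directly (the center cell is never > itself, so no skip
--     is needed)."""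
--     h = window // 2
--     n = len(levels)
--     out = []
--     for x in range(n):
--         row = levels[x]
--         L = len(row)
--         if window < 1 or x < h or x >= n - h - 1 or L < 2 * h + 2:
--             out.append([0] * L)
--             continue
--         band = levels[x - h : x - h + window]
--         # columns y-h .. y+window-2-h for the first interior column y = h
--         win = [r[j] for j in range(window - 1) for r in band]
--         new_row = [0] * h
--         for y in range(h, L - h - 1):
--             win = win + [r[y + window - 1 - h] for r in band]
--             c = row[y]
--             new_row.append(sum(1 for v in win if v > c))
--             win = win[len(band):]
--         new_row += [0] * (L - len(new_row))
--         out.append(new_row)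
--     return out
-- ===== Notes on version B (the rewrite author's own statement) =====
-- stated objective: faster
-- what changed: Instead of re-scanning the whole w*w window with double index arithmetic and a centre-skip branch for every pixel, B keeps the flattened window contents per row as a list slid one column at a time (append the incoming column, count, drop the leftmost column block) and counts strictly greater values directly over it (the centre never exceeds itself, so no skip is needed); edge rows/columns are emitted as zero padding. Pre_ excludes exactly the ragged inputs on which A raises IndexError (B raises there too).
import Mathlib
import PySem

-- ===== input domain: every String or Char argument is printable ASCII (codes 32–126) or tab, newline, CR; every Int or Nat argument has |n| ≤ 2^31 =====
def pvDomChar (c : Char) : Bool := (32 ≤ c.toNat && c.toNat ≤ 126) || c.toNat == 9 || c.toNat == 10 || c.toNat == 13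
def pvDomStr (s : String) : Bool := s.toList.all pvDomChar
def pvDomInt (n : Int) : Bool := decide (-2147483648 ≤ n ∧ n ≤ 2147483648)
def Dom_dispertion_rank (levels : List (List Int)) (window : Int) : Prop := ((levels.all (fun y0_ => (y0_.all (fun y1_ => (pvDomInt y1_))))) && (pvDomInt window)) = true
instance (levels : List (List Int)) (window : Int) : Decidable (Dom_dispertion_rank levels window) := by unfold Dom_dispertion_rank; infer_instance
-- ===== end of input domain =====

-- B replaces A's per-pixel re-scan (double index arithmetic + centre-skip branch) by a per-row
-- sliding flattened window (append incoming column, count, drop leftmost column); constant-factor objective.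

-- ===== PORT A =====
def dispertion_rank (levels : List (List Int)) (window : Int) : List (List Int) :=
  (PySem.List.pyRange 0 (PySem.List.len levels)).foldl (fun rank x =>
    rank ++ [(PySem.List.pyRange 0 (PySem.List.len (PySem.List.pyGetD levels x []))).foldl (fun row y =>
      if x < PySem.Int.floordiv window 2 ∨ x ≥ PySem.List.len levels - PySem.Int.floordiv window 2 - 1 then
        row ++ [0]
      else if y < PySem.Int.floordiv window 2 ∨ y ≥ PySem.List.len (PySem.List.pyGetD levels x []) - PySem.Int.floordiv window 2 - 1 then
        row ++ [0]
      else
        row ++ [(PySem.List.pyRange 0 window).foldl (fun c i =>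
          (PySem.List.pyRange 0 window).foldl (fun c j =>
            if i = PySem.Int.floordiv window 2 ∧ j = PySem.Int.floordiv window 2 then c
            else if PySem.List.pyGetD (PySem.List.pyGetD levels x []) y 0 <
                PySem.List.pyGetD (PySem.List.pyGetD levels (x - PySem.Int.floordiv window 2 + i) [])
                  (y - PySem.Int.floordiv window 2 + j) 0 then c + 1
            else c) c) 0]) []]) []

-- ===== PORT B =====
def dispertion_rank_alt (levels : List (List Int)) (window : Int) : List (List Int) :=
  let h := PySem.Int.floordiv window 2
  let n := PySem.List.len levels
  (PySem.List.pyRange 0 n).foldl (fun out x =>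
    let row := PySem.List.pyGetD levels x []
    let L := PySem.List.len row
    if window < 1 ∨ x < h ∨ x ≥ n - h - 1 ∨ L < 2 * h + 2 then
      out ++ [PySem.List.pyRepeat [0] L]
    else
      let band := PySem.List.slice levels (some (x - h)) (some (x - h + window))
      let win0 := (PySem.List.pyRange 0 (window - 1)).flatMap (fun j => band.map (fun r => PySem.List.pyGetD r j 0))
      let p := (PySem.List.pyRange h (L - h - 1)).foldl
        (fun (st : List Int × List Int) y =>
          let w := st.2 ++ band.map (fun r => PySem.List.pyGetD r (y + window - 1 - h) 0)
          (st.1 ++ [((w.filter (fun v => decide (PySem.List.pyGetD row y 0 < v))).map (fun _ => (1 : Int))).sum],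
           PySem.List.slice w (some (PySem.List.len band)) none))
        (PySem.List.pyRepeat [0] h, win0)
      out ++ [p.1 ++ PySem.List.pyRepeat [0] (L - PySem.List.len p.1)]) []

-- ===== PRECONDITION & SPEC =====
-- Pre_ excludes exactly the inputs on which the Python A raises IndexError: a ragged row inside
-- the window band of some interior pixel that is too short for the window's column span.
def Pre_dispertion_rank (levels : List (List Int)) (window : Int) : Prop :=
  1 ≤ window →
    ∀ x : Nat, x < levels.length →
      (PySem.Int.floordiv window 2 ≤ (x : Int) ∧
       (x : Int) + PySem.Int.floordiv window 2 + 2 ≤ (levels.length : Int) ∧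
       2 * PySem.Int.floordiv window 2 + 2 ≤ ((levels.getD x []).length : Int)) →
      ∀ i : Nat, i < window.toNat →
        ((levels.getD x []).length : Int) + window - 2 * PySem.Int.floordiv window 2 - 2 ≤
          ((levels.getD (x - (PySem.Int.floordiv window 2).toNat + i) []).length : Int)
instance (levels : List (List Int)) (window : Int) : Decidable (Pre_dispertion_rank levels window) := by
  unfold Pre_dispertion_rank; infer_instance

def pvWitness_dispertion_rank : List (List Int) × Int :=
  ([[1, 2, 3, 4], [4, 3, 2, 1], [5, 6, 7, 8], [8, 7, 6, 5]], 3)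

def Spec_dispertion_rank (levels : List (List Int)) (window : Int) (out : List (List Int)) : Prop := out = dispertion_rank_alt levels window
instance (levels : List (List Int)) (window : Int) (out : List (List Int)) : Decidable (Spec_dispertion_rank levels window out) := by unfold Spec_dispertion_rank; infer_instance

-- ===== CLAIM (what is proved, stated in full; the proofs are below) =====
def Claim_equal_dispertion_rank : Prop := ∀ (levels : List (List Int)) (window : Int), Dom_dispertion_rank levels window → Pre_dispertion_rank levels window → Spec_dispertion_rank levels window (dispertion_rank levels window)

-- ===== LEMMAS AND PROOFS =====

-- A's per-cell value, exactly as port A computes it.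
def AcellD (levels : List (List Int)) (window x y : Int) : Int :=
  if x < PySem.Int.floordiv window 2 ∨ x ≥ PySem.List.len levels - PySem.Int.floordiv window 2 - 1 then 0
  else if y < PySem.Int.floordiv window 2 ∨ y ≥ PySem.List.len (PySem.List.pyGetD levels x []) - PySem.Int.floordiv window 2 - 1 then 0
  else (PySem.List.pyRange 0 window).foldl (fun c i =>
    (PySem.List.pyRange 0 window).foldl (fun c j =>
      if i = PySem.Int.floordiv window 2 ∧ j = PySem.Int.floordiv window 2 then c
      else if PySem.List.pyGetD (PySem.List.pyGetD levels x []) y 0 <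
          PySem.List.pyGetD (PySem.List.pyGetD levels (x - PySem.Int.floordiv window 2 + i) [])
            (y - PySem.Int.floordiv window 2 + j) 0 then c + 1
      else c) c) 0

def bandOf (levels : List (List Int)) (window x : Int) : List (List Int) :=
  PySem.List.slice levels (some (x - PySem.Int.floordiv window 2))
    (some (x - PySem.Int.floordiv window 2 + window))

def colOf (levels : List (List Int)) (window x j : Int) : List Int :=
  (bandOf levels window x).map (fun r => PySem.List.pyGetD r j 0)

-- the full window contents at column y
def winAt (levels : List (List Int)) (window x y : Int) : List Int :=
  (PySem.List.pyRange (y - PySem.Int.floordiv window 2) (y + window - PySem.Int.floordiv window 2)).flatMap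
    (colOf levels window x)

-- the window contents at loop entry for column y: the incoming column is not yet appended
def winPre (levels : List (List Int)) (window x y : Int) : List Int :=
  (PySem.List.pyRange (y - PySem.Int.floordiv window 2) (y + window - 1 - PySem.Int.floordiv window 2)).flatMap
    (colOf levels window x)

def cntB (levels : List (List Int)) (window x y : Int) : Int :=
  ((((winAt levels window x y).filter
      (fun v => decide (PySem.List.pyGetD (PySem.List.pyGetD levels x []) y 0 < v))).map
      (fun _ => (1 : Int))).sum)

lemma half_facts (window : Int) (hw : 1 ≤ window) :
    0 ≤ PySem.Int.floordiv window 2 ∧ 2 * PySem.Int.floordiv window 2 ≤ window ∧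
      window ≤ 2 * PySem.Int.floordiv window 2 + 1 := by
  have h1 := PySem.Int.floordiv_mul_add_mod window 2
  have h2 := PySem.Int.mod_nonneg window (b := 2) (by omega)
  have h3 := PySem.Int.mod_lt window (b := 2) (by omega)
  omega

lemma A_shape (levels : List (List Int)) (window : Int) :
    dispertion_rank levels window =
      (PySem.List.pyRange 0 (PySem.List.len levels)).map (fun x =>
        (PySem.List.pyRange 0 (PySem.List.len (PySem.List.pyGetD levels x []))).map
          (fun y => AcellD levels window x y)) := by
  unfold dispertion_rank
  rw [PySem.List.foldl_congr_mem _ _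
    (fun (rank : List (List Int)) x => rank ++
      [(PySem.List.pyRange 0 (PySem.List.len (PySem.List.pyGetD levels x []))).foldl (fun row y =>
        row ++ [AcellD levels window x y]) []]) _
    (by
      intro acc x _
      refine congrArg (fun l => acc ++ [l]) ?_
      apply PySem.List.foldl_congr_mem
      intro row y _
      unfold AcellD
      split_ifs <;> rfl)]
  rw [PySem.List.foldl_append_singleton_eq_map, List.nil_append]
  apply List.map_congr_left
  intro x _
  rw [PySem.List.foldl_append_singleton_eq_map, List.nil_append]

lemma map_pyRange_eq_replicate {f : Int → Int} {a b v : Int}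
    (hf : ∀ y, a ≤ y → y < b → f y = v) :
    (PySem.List.pyRange a b).map f = List.replicate (b - a).toNat v := by
  apply List.eq_replicate_iff.mpr
  constructor
  · simp [PySem.List.length_pyRange_one]
  · intro z hz
    obtain ⟨y, hy, rfl⟩ := List.mem_map.mp hz
    rw [PySem.List.mem_pyRange_one] at hy
    exact hf y hy.1 hy.2

lemma pyRange_one_shift (a : Int) (W : Nat) :
    PySem.List.pyRange a (a + (W : Int)) = List.map (fun k : Nat => a + (k : Int)) (List.range W) := by
  induction W with
  | zero => simp [PySem.List.pyRange_one_eq_nil]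
  | succ n ih =>
    rw [Nat.cast_succ, ← add_assoc, PySem.List.pyRange_one_succ_right (by omega), ih]
    simp [List.range_succ]

lemma band_eq (levels : List (List Int)) (window x : Int) (hw : 1 ≤ window)
    (hx0 : PySem.Int.floordiv window 2 ≤ x)
    (hx1 : x + PySem.Int.floordiv window 2 + 2 ≤ (levels.length : Int)) :
    bandOf levels window x =
      (PySem.List.pyRange 0 window).map
        (fun i => PySem.List.pyGetD levels (x - PySem.Int.floordiv window 2 + i) []) := by
  obtain ⟨hh0, hh1, hh2⟩ := half_facts window hw
  set h := PySem.Int.floordiv window 2 with hh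
  have hxa : (0:Int) ≤ x - h := by omega
  have hxb : (0:Int) ≤ x - h + window := by omega
  have hle : x - h + window ≤ (levels.length : Int) := by omega
  unfold bandOf
  rw [PySem.List.slice_toNat _ hxa hxb]
  have hW : window = ((window.toNat : Int)) := by omega
  rw [hW, PySem.List.pyRange_zero_natCast]
  apply List.ext_getElem
  · simp
    omega
  · intro i hi1 hi2
    simp only [List.getElem_take, List.getElem_drop, List.getElem_map, List.getElem_range]
    have hcast : x - h + (i : Int) = (((x - h).toNat + i : Nat) : Int) := by push_cast; omega
    rw [hcast, PySem.List.pyGetD_natCast]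
    have hi' : i < window.toNat := by simpa using hi2
    rw [List.getD_eq_getElem _ _ (by omega)]

-- appending the incoming column to the entry window yields the full window at y
lemma win_append (levels : List (List Int)) (window x y : Int) (hw : 1 ≤ window) :
    winPre levels window x y ++
        (bandOf levels window x).map
          (fun r => PySem.List.pyGetD r (y + window - 1 - PySem.Int.floordiv window 2) 0) =
      winAt levels window x y := by
  obtain ⟨hh0, hh1, hh2⟩ := half_facts window hw
  set h := PySem.Int.floordiv window 2 with hh
  unfold winPre winAt
  have h2 : y + window - h = (y + window - 1 - h) + 1 := by ring
  rw [h2, PySem.List.pyRange_one_succ_right (by omega), List.flatMap_append]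
  simp [colOf, hh, PySem.Int.floordiv]

-- dropping the leftmost column of the full window at y yields the entry window for y+1
lemma win_drop (levels : List (List Int)) (window x y : Int) (hw : 1 ≤ window) :
    List.drop (bandOf levels window x).length (winAt levels window x y) =
      winPre levels window x (y + 1) := by
  obtain ⟨hh0, hh1, hh2⟩ := half_facts window hw
  set h := PySem.Int.floordiv window 2 with hh
  unfold winAt winPre
  rw [PySem.List.pyRange_one_cons (a := y - h) (b := y + window - h) (by omega)]
  rw [List.flatMap_cons]
  have hlen : (colOf levels window x (y - h)).length = (bandOf levels window x).length := by
    simp [colOf]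
  rw [← hlen, List.drop_left]
  have h1 : y + 1 - h = y - h + 1 := by ring
  have h2 : y + 1 + window - 1 - h = y + window - h := by ring
  rw [h1, h2]

lemma sum_list_range {M : Type} [AddCommMonoid M] (f : Nat → M) (n : Nat) :
    ((List.range n).map f).sum = ∑ i ∈ Finset.range n, f i := by rfl

lemma countP_range_sum (q : Nat → Bool) (n : Nat) :
    ((List.countP q (List.range n) : Nat) : Int) = ∑ j ∈ Finset.range n, if q j then (1:Int) else 0 := by
  rw [← PySem.List.sum_map_ite_one_zero q (List.range n), sum_list_range]

lemma cnt_eq_core (levels : List (List Int)) (window x y : Int) (hw : 1 ≤ window)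
    (hx0 : PySem.Int.floordiv window 2 ≤ x)
    (hx1 : x + PySem.Int.floordiv window 2 + 2 ≤ (levels.length : Int)) :
    (PySem.List.pyRange 0 window).foldl (fun c i =>
      (PySem.List.pyRange 0 window).foldl (fun c j =>
        if i = PySem.Int.floordiv window 2 ∧ j = PySem.Int.floordiv window 2 then c
        else if PySem.List.pyGetD (PySem.List.pyGetD levels x []) y 0 <
            PySem.List.pyGetD (PySem.List.pyGetD levels (x - PySem.Int.floordiv window 2 + i) [])
              (y - PySem.Int.floordiv window 2 + j) 0 then c + 1
        else c) c) 0 = cntB levels window x y := by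
  obtain ⟨hh0, hh1, hh2⟩ := half_facts window hw
  set h := PySem.Int.floordiv window 2 with hh
  set c0 := PySem.List.pyGetD (PySem.List.pyGetD levels x []) y 0 with hc0
  set W := window.toNat with hWdef
  have hW : window = (W : Int) := by omega
  rw [PySem.List.foldl_congr_mem _ _
    (fun (c : Int) (i : Int) => c +
      ((List.countP (fun j => decide (¬(i = h ∧ j = h) ∧
        c0 < PySem.List.pyGetD (PySem.List.pyGetD levels (x - h + i) []) (y - h + j) 0))
        (PySem.List.pyRange 0 window) : Nat) : Int)) _
    (by
      intro acc i _
      dsimp only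
      rw [show (fun (c : Int) (j : Int) =>
          if i = h ∧ j = h then c
          else if c0 < PySem.List.pyGetD (PySem.List.pyGetD levels (x - h + i) []) (y - h + j) 0 then c + 1
          else c)
        = (fun (c : Int) (j : Int) =>
          if ¬(i = h ∧ j = h) ∧
              c0 < PySem.List.pyGetD (PySem.List.pyGetD levels (x - h + i) []) (y - h + j) 0 then c + 1
          else c) from by
          funext c j; split_ifs <;> tauto]
      rw [PySem.List.foldl_ite_add_one])]
  rw [PySem.List.foldl_add, zero_add]
  unfold cntB winAt colOf
  rw [PySem.List.sum_map_const_int, ← List.countP_eq_length_filter, mul_one]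
  rw [band_eq levels window x hw hx0 hx1]
  rw [show y + window - h = (y - h) + (W : Int) from by omega, pyRange_one_shift]
  have hr0 : PySem.List.pyRange 0 window = List.map (fun k : Nat => (k : Int)) (List.range W) := by
    rw [hW]; exact_mod_cast PySem.List.pyRange_zero_natCast W
  rw [hr0, List.flatMap_map, List.flatMap_def]
  simp only [List.countP_flatten, List.map_map, Function.comp_def, List.countP_map]
  rw [sum_list_range, sum_list_range, Nat.cast_sum]
  rw [← hh]
  simp only [countP_range_sum]
  rw [Finset.sum_comm]
  apply Finset.sum_congr rfl
  intro j _
  apply Finset.sum_congr rfl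
  intro i _
  by_cases hcen : ((i : Int) = h ∧ (j : Int) = h)
  · obtain ⟨hi, hj⟩ := hcen
    simp [hi, hj]
  · rw [← hc0]
    congr 1
    simp only [decide_eq_true_eq]
    exact propext (by tauto)

lemma foldB (levels : List (List Int)) (window x : Int) (hw : 1 ≤ window) :
    ∀ (k : Nat) (a : Int) (acc : List Int),
      ((PySem.List.pyRange a (a + (k : Int))).foldl
        (fun (st : List Int × List Int) y =>
          let w := st.2 ++ (PySem.List.slice levels (some (x - PySem.Int.floordiv window 2))
              (some (x - PySem.Int.floordiv window 2 + window))).map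
              (fun r => PySem.List.pyGetD r (y + window - 1 - PySem.Int.floordiv window 2) 0)
          (st.1 ++ [((w.filter (fun v =>
              decide (PySem.List.pyGetD (PySem.List.pyGetD levels x []) y 0 < v))).map
              (fun _ => (1 : Int))).sum],
           PySem.List.slice w (some (PySem.List.len
             (PySem.List.slice levels (some (x - PySem.Int.floordiv window 2))
               (some (x - PySem.Int.floordiv window 2 + window))))) none))
        (acc, winPre levels window x a)).1
      = acc ++ (PySem.List.pyRange a (a + (k : Int))).map (fun y => cntB levels window x y) := by
  simp only [show PySem.List.slice levels (some (x - PySem.Int.floordiv window 2))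
      (some (x - PySem.Int.floordiv window 2 + window)) = bandOf levels window x from rfl]
  intro k
  induction k with
  | zero =>
    intro a acc
    simp
  | succ n ih =>
    intro a acc
    have hr : a + ((n+1 : Nat) : Int) = (a + 1) + (n : Int) := by push_cast; ring
    rw [hr, PySem.List.pyRange_one_cons (by
      have : (0:Int) ≤ (n:Int) := by positivity
      omega)]
    rw [List.foldl_cons, List.map_cons]
    dsimp only
    rw [win_append levels window x a hw]
    have hdrop : PySem.List.slice (winAt levels window x a)
        (some (PySem.List.len (bandOf levels window x))) none = winPre levels window x (a + 1) := by
      rw [PySem.List.len_eq, PySem.List.slice_from_natCast]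
      exact win_drop levels window x a hw
    rw [hdrop]
    have h3 := ih (a + 1) (acc ++ [cntB levels window x a])
    simp only [cntB] at h3 ⊢
    rw [h3]
    simp

lemma row_eq (levels : List (List Int)) (window : Int)
    (x : Int) (_hx : 0 ≤ x) (_hxn : x < (levels.length : Int)) :
    (PySem.List.pyRange 0 (PySem.List.len (PySem.List.pyGetD levels x []))).map
        (fun y => AcellD levels window x y) =
      (let h := PySem.Int.floordiv window 2
       let n := PySem.List.len levels
       let row := PySem.List.pyGetD levels x []
       let L := PySem.List.len row
       if window < 1 ∨ x < h ∨ x ≥ n - h - 1 ∨ L < 2 * h + 2 then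
         PySem.List.pyRepeat [0] L
       else
         let band := PySem.List.slice levels (some (x - h)) (some (x - h + window))
         let win0 := (PySem.List.pyRange 0 (window - 1)).flatMap (fun j => band.map (fun r => PySem.List.pyGetD r j 0))
         let p := (PySem.List.pyRange h (L - h - 1)).foldl
           (fun (st : List Int × List Int) y =>
             let w := st.2 ++ band.map (fun r => PySem.List.pyGetD r (y + window - 1 - h) 0)
             (st.1 ++ [((w.filter (fun v => decide (PySem.List.pyGetD row y 0 < v))).map (fun _ => (1 : Int))).sum],
              PySem.List.slice w (some (PySem.List.len band)) none))
           (PySem.List.pyRepeat [0] h, win0)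
         p.1 ++ PySem.List.pyRepeat [0] (L - PySem.List.len p.1)) := by
  dsimp only
  by_cases hg : (window < 1 ∨ x < PySem.Int.floordiv window 2 ∨
      x ≥ PySem.List.len levels - PySem.Int.floordiv window 2 - 1 ∨
      PySem.List.len (PySem.List.pyGetD levels x []) < 2 * PySem.Int.floordiv window 2 + 2)
  · rw [if_pos hg, PySem.List.pyRepeat_singleton]
    rw [show (PySem.List.len (PySem.List.pyGetD levels x [])).toNat
        = ((PySem.List.len (PySem.List.pyGetD levels x [])) - 0).toNat from by omega]
    apply map_pyRange_eq_replicate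
    intro y hy0 hyL
    unfold AcellD
    split_ifs with h1 h2
    · rfl
    · rfl
    · push_neg at h1 h2
      rcases hg with hgw | hgx | hgx | hgL
      · rw [PySem.List.pyRange_one_eq_nil (by omega : window ≤ 0)]
        rfl
      · exact absurd hgx (by omega)
      · exact absurd hgx (by omega)
      · exact absurd hgL (by omega)
  · rw [if_neg hg]
    push_neg at hg
    obtain ⟨hw1', hx0, hx1, hL⟩ := hg
    have hw1 : 1 ≤ window := by omega
    obtain ⟨hh0, hh1, hh2⟩ := half_facts window hw1
    have hwin0 : (PySem.List.pyRange 0 (window - 1)).flatMap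
        (fun j => (PySem.List.slice levels (some (x - PySem.Int.floordiv window 2))
          (some (x - PySem.Int.floordiv window 2 + window))).map (fun r => PySem.List.pyGetD r j 0))
        = winPre levels window x (PySem.Int.floordiv window 2) := by
      unfold winPre colOf bandOf
      rw [show PySem.Int.floordiv window 2 - PySem.Int.floordiv window 2 = 0 from by ring,
        show PySem.Int.floordiv window 2 + window - 1 - PySem.Int.floordiv window 2 = window - 1 from by ring]
    rw [hwin0]
    have hk : PySem.Int.floordiv window 2 +
        (((PySem.List.len (PySem.List.pyGetD levels x []) - 2 * PySem.Int.floordiv window 2 - 1).toNat : Nat) : Int)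
        = PySem.List.len (PySem.List.pyGetD levels x []) - PySem.Int.floordiv window 2 - 1 := by
      omega
    rw [← hk, PySem.List.pyRepeat_singleton,
      foldB levels window x hw1
        ((PySem.List.len (PySem.List.pyGetD levels x []) - 2 * PySem.Int.floordiv window 2 - 1).toNat)
        (PySem.Int.floordiv window 2)
        (List.replicate (PySem.Int.floordiv window 2).toNat 0)]
    rw [PySem.List.pyRange_one_append 0 (PySem.Int.floordiv window 2)
        (PySem.List.len (PySem.List.pyGetD levels x [])) (by omega) (by omega),
      PySem.List.pyRange_one_append (PySem.Int.floordiv window 2)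
        (PySem.Int.floordiv window 2 +
          (((PySem.List.len (PySem.List.pyGetD levels x []) - 2 * PySem.Int.floordiv window 2 - 1).toNat : Nat) : Int))
        (PySem.List.len (PySem.List.pyGetD levels x [])) (by omega) (by omega),
      List.map_append, List.map_append]
    rw [List.append_assoc]
    congr 1
    · rw [show (PySem.Int.floordiv window 2).toNat = (PySem.Int.floordiv window 2 - 0).toNat from by omega]
      apply map_pyRange_eq_replicate
      intro y hy0 hyh
      unfold AcellD
      rw [if_neg (by omega), if_pos (by omega)]
    congr 1
    · apply List.map_congr_left
      intro y hy
      rw [PySem.List.mem_pyRange_one] at hy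
      unfold AcellD
      rw [if_neg (by omega), if_neg (by omega)]
      exact cnt_eq_core levels window x y hw1 hx0 (by simp only [PySem.List.len_eq] at hx1; omega)
    · rw [PySem.List.pyRepeat_singleton]
      rw [show (PySem.List.len (PySem.List.pyGetD levels x []) -
          PySem.List.len (List.replicate (PySem.Int.floordiv window 2).toNat 0 ++
          (PySem.List.pyRange (PySem.Int.floordiv window 2)
            (PySem.Int.floordiv window 2 +
              (((PySem.List.len (PySem.List.pyGetD levels x []) - 2 * PySem.Int.floordiv window 2 - 1).toNat : Nat) : Int))).map
            (fun y => cntB levels window x y))).toNat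
          = (PySem.List.len (PySem.List.pyGetD levels x []) -
             (PySem.Int.floordiv window 2 +
              (((PySem.List.len (PySem.List.pyGetD levels x []) - 2 * PySem.Int.floordiv window 2 - 1).toNat : Nat) : Int))).toNat from by
            simp only [PySem.List.len_eq, List.length_append, List.length_replicate,
              List.length_map, PySem.List.length_pyRange_one]
            omega]
      apply map_pyRange_eq_replicate
      intro y hy0 hyL
      unfold AcellD
      split_ifs with h1 h2
      · rfl
      · rfl
      · push_neg at h1 h2
        exact absurd h2.2 (by omega)

-- ===== VERDICT (by name: the statement is the Claim_ definition above) =====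
theorem dispertion_rank_spec : Claim_equal_dispertion_rank := by
  intro levels window _hdom _hpre
  unfold Spec_dispertion_rank
  rw [A_shape]
  unfold dispertion_rank_alt
  rw [PySem.List.foldl_congr_mem _ _
    (fun (out : List (List Int)) x => out ++
      [(let h := PySem.Int.floordiv window 2
        let n := PySem.List.len levels
        let row := PySem.List.pyGetD levels x []
        let L := PySem.List.len row
        if window < 1 ∨ x < h ∨ x ≥ n - h - 1 ∨ L < 2 * h + 2 then
          PySem.List.pyRepeat [0] L
        else
          let band := PySem.List.slice levels (some (x - h)) (some (x - h + window))
          let win0 := (PySem.List.pyRange 0 (window - 1)).flatMap (fun j => band.map (fun r => PySem.List.pyGetD r j 0))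
          let p := (PySem.List.pyRange h (L - h - 1)).foldl
            (fun (st : List Int × List Int) y =>
              let w := st.2 ++ band.map (fun r => PySem.List.pyGetD r (y + window - 1 - h) 0)
              (st.1 ++ [((w.filter (fun v => decide (PySem.List.pyGetD row y 0 < v))).map (fun _ => (1 : Int))).sum],
               PySem.List.slice w (some (PySem.List.len band)) none))
            (PySem.List.pyRepeat [0] h, win0)
          p.1 ++ PySem.List.pyRepeat [0] (L - PySem.List.len p.1))]) _
    (by intro acc x _; dsimp only; split <;> rfl)]
  rw [PySem.List.foldl_append_singleton_eq_map, List.nil_append]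
  apply List.map_congr_left
  intro x hx
  rw [PySem.List.mem_pyRange_one] at hx
  have := row_eq levels window x hx.1 (by simpa [PySem.List.len_eq] using hx.2)
  simpa [PySem.List.len_eq] using this
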